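-- pv_equiv track=rewrite | github.com/yyfsunnyboy/Mathproject_tvet_mathB | skills/jh_數學1上_CommonDivisibilityRules.py | _is_divisible_by_11
-- ===== SOURCE A (Python) =====
-- def _get_digits(n_str: str) -> list[int]:
--     """
--     從數字字串中提取所有數字並以整數列表回傳，忽略非數字字元。
--     範例: "_123*" -> [1, 2, 3]
--     """
--     return [int(d) for d in n_str if d.isdigit()]
--
-- def _is_divisible_by_11(n_str: str) -> bool:
--     """
--     判斷一個數字字串是否能被 11 整除。
--     依據：奇數位數字之和與偶數位數字之和的差能被 11 整除 (從右邊數起)。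
--     範例: abcde -> (e + c + a) - (d + b) 能被 11 整除。
--     """
--     digits = _get_digits(n_str)
--     if not digits: return False
--     alternating_sum = 0
--     for i, digit in enumerate(reversed(digits)):
--         if i % 2 == 0: # 從右邊數起第1, 3, 5...位 (0-indexed: 0, 2, 4...)
--             alternating_sum += digit
--         else: # 從右邊數起第2, 4, 6...位 (0-indexed: 1, 3, 5...)
--             alternating_sum -= digit
--     return alternating_sum % 11 == 0
-- ===== SOURCE B (Python) =====
-- def _is_divisible_by_11(n_str: str) -> bool:
--     # One pass: build the full number from the digit characters; 10 == -1 (mod 11)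
--     # makes its remainder agree with the alternating digit sum.
--     value = 0
--     seen = False
--     for c in n_str:
--         if c.isdigit():
--             value = value * 10 + int(c)
--             seen = True
--     return seen and value % 11 == 0
-- ===== Notes on version B (the rewrite author's own statement) =====
-- stated objective: simpler
-- what changed: Instead of extracting a digit list, reversing it and accumulating a parity-branched alternating sum, B makes one pass over the string building the actual number (value = value*10 + digit) and tests value % 11 == 0, relying on 10 ≡ -1 (mod 11).
import Mathlib
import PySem

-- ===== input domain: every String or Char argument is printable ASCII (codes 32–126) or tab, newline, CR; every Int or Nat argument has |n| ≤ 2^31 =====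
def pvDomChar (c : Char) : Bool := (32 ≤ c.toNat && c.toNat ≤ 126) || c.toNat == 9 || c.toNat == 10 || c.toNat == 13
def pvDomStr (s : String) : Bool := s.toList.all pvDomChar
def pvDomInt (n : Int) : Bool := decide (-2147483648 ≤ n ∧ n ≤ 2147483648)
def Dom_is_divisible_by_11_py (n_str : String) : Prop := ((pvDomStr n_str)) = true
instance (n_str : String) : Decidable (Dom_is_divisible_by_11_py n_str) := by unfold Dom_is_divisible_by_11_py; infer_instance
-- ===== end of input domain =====

-- B replaces A's reverse/enumerate/parity alternating sum with one pass that builds the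
-- actual number (value*10 + digit) and tests it mod 11; objective: simpler.

-- ===== PORT A =====
-- digits = [int(d) for d in n_str if d.isdigit()]; on digit chars int(d) is the digit value (c.toNat - 48, exact on ASCII)
def is_divisible_by_11_py (n_str : String) : Bool :=
  let digits : List Int :=
    (n_str.toList.filter (fun c => PySem.Chars.isdigit c)).map (fun c => ((c.toNat : Int) - 48))
  if digits.isEmpty then false
  else
    let alternating_sum : Int :=
      (PySem.List.enumerate digits.reverse 0).foldl
        (fun a p => if PySem.Int.mod p.1 2 == 0 then a + p.2 else a - p.2) 0
    PySem.Int.mod alternating_sum 11 == 0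

-- ===== PORT B =====
def is_divisible_by_11_py_alt (n_str : String) : Bool :=
  let st := n_str.toList.foldl
    (fun st c => if PySem.Chars.isdigit c then (st.1 * 10 + ((c.toNat : Int) - 48), true) else st)
    ((0 : Int), false)
  st.2 && (PySem.Int.mod st.1 11 == 0)

-- ===== PRECONDITION & SPEC =====
def Spec_is_divisible_by_11_py (n_str : String) (out : Bool) : Prop := out = is_divisible_by_11_py_alt n_str
instance (n_str : String) (out : Bool) : Decidable (Spec_is_divisible_by_11_py n_str out) := by unfold Spec_is_divisible_by_11_py; infer_instance

-- ===== CLAIM (what is proved, stated in full; the proofs are below) =====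
def Claim_equal_is_divisible_by_11_py : Prop := ∀ (n_str : String), Dom_is_divisible_by_11_py n_str → Spec_is_divisible_by_11_py n_str (is_divisible_by_11_py n_str)

-- ===== LEMMAS AND PROOFS =====

-- alternating sum from the left of a list (first element positive)
def pvGsum : List Int → Int
  | [] => 0
  | d :: t => d - pvGsum t

-- A's enumerate-fold over rs starting at index s is the (sign-adjusted) alternating sum
theorem pvEnumFold (rs : List Int) : ∀ (s : Nat) (a : Int),
    (PySem.List.enumerate rs (s : Int)).foldl
      (fun a p => if PySem.Int.mod p.1 2 == 0 then a + p.2 else a - p.2) a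
      = a + (if s % 2 = 0 then pvGsum rs else -pvGsum rs) := by
  induction rs with
  | nil => intro s a; simp [PySem.List.enumerate_nil, pvGsum]
  | cons d t ih =>
    intro s a
    rw [PySem.List.enumerate_cons, List.foldl_cons]
    have hcast : ((s : Int) + 1) = ((s + 1 : Nat) : Int) := by push_cast; ring
    have hmod : PySem.Int.mod (s : Int) 2 = ((s % 2 : Nat) : Int) := by
      rw [PySem.Int.mod_eq_emod_of_pos (by norm_num)]; omega
    rw [hcast, ih (s + 1)]
    rcases Nat.mod_two_eq_zero_or_one s with h | h
    · have h1 : (s + 1) % 2 = 1 := by omega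
      simp only [hmod, h, h1, pvGsum]
      norm_num
      ring
    · have h1 : (s + 1) % 2 = 0 := by omega
      simp only [hmod, h, h1, pvGsum]
      norm_num
      ring

-- the number built left-to-right differs from the right-to-left alternating sum by a multiple of 11
theorem pvNumSub (ds : List Int) :
    (11 : Int) ∣ ds.foldl (fun a d => a * 10 + d) 0 - pvGsum ds.reverse := by
  induction ds using List.reverseRecOn with
  | nil => simp [pvGsum]
  | append_singleton xs d ih =>
    rw [List.foldl_append, List.reverse_append]
    simp only [List.reverse_cons, List.reverse_nil, List.nil_append, List.singleton_append,
      List.foldl_cons, List.foldl_nil, pvGsum]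
    omega

-- B's paired fold splits into the value fold and an "any digit" flag
theorem pvBFold (cs : List Char) : ∀ (v : Int) (b : Bool),
    cs.foldl (fun st c => if PySem.Chars.isdigit c then (st.1 * 10 + ((c.toNat : Int) - 48), true) else st) (v, b)
      = (cs.foldl (fun a c => if PySem.Chars.isdigit c then a * 10 + ((c.toNat : Int) - 48) else a) v,
         b || cs.any (fun c => PySem.Chars.isdigit c)) := by
  induction cs with
  | nil => intro v b; simp
  | cons c t ih =>
    intro v b
    by_cases h : PySem.Chars.isdigit c = true
    · simp [h, ih]
    · simp [h, ih]

-- ===== VERDICT (by name: the statement is the Claim_ definition above) =====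
theorem is_divisible_by_11_py_spec : Claim_equal_is_divisible_by_11_py := by
  intro n_str _
  unfold Spec_is_divisible_by_11_py is_divisible_by_11_py is_divisible_by_11_py_alt
  set cs := n_str.toList with hcs
  set ds : List Int := (cs.filter (fun c => PySem.Chars.isdigit c)).map (fun c => ((c.toNat : Int) - 48)) with hds
  -- B's fold, split
  rw [pvBFold]
  -- B's value fold = fold over the extracted digit list
  have hval : cs.foldl (fun a c => if PySem.Chars.isdigit c then a * 10 + ((c.toNat : Int) - 48) else a) 0
      = ds.foldl (fun a d => a * 10 + d) 0 := by
    rw [hds, List.foldl_map, List.foldl_filter]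
  -- A's alternating fold = pvGsum ds.reverse
  have halt : (PySem.List.enumerate ds.reverse 0).foldl
      (fun a p => if PySem.Int.mod p.1 2 == 0 then a + p.2 else a - p.2) 0 = pvGsum ds.reverse := by
    have := pvEnumFold ds.reverse 0 0
    simpa using this
  by_cases hemp : ds.isEmpty
  · have hnil : cs.filter (fun c => PySem.Chars.isdigit c) = [] := by
      have := List.isEmpty_iff.mp hemp
      rw [hds] at this
      exact List.map_eq_nil_iff.mp this
    have hnil' := List.filter_eq_nil_iff.mp hnil
    have hany : cs.any (fun c => PySem.Chars.isdigit c) = false := by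
      simp only [Bool.eq_false_iff]
      intro hcontra
      rcases List.any_eq_true.mp hcontra with ⟨c, hc, hd⟩
      exact hnil' c hc hd
    simp [hemp, hany]
  · have hany : cs.any (fun c => PySem.Chars.isdigit c) = true := by
      have hne : cs.filter (fun c => PySem.Chars.isdigit c) ≠ [] := by
        intro h
        apply hemp
        rw [hds, h]; rfl
      rcases List.exists_mem_of_ne_nil _ hne with ⟨c, hc⟩
      rcases List.mem_filter.mp hc with ⟨hc1, hc2⟩
      exact List.any_eq_true.mpr ⟨c, hc1, hc2⟩
    simp only [hemp, hany, Bool.false_eq_true, if_false]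
    rw [halt, hval]
    rcases pvNumSub ds with ⟨k, hk⟩
    rw [Bool.eq_iff_iff]
    simp only [Bool.false_or, Bool.true_and, beq_iff_eq, PySem.Int.mod_eq_zero_iff_dvd]
    constructor
    · intro h
      rcases h with ⟨m, hm⟩
      exact ⟨m + k, by linarith⟩
    · intro h
      rcases h with ⟨m, hm⟩
      exact ⟨m - k, by linarith⟩
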